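-- pv_equiv track=rewrite | github.com/BzhangURU/LeetCode-Python-Solutions | LC00667_Beautiful_Arrangement_II.py | constructArray
-- ===== SOURCE A (Python) =====
-- from typing import List
--
-- def constructArray(n: int, k: int) -> List[int]:
--     result=[]
--     for i in range(k+1):
--         if i&1==0:
--             result.append((i//2)+1)
--         else:
--             result.append(k+1-i//2)
--     for i in range(k+1,n):
--         result.append(i+1)
--     return result
-- ===== SOURCE B (Python) =====
-- def constructArray(n, k):
--     num_low = (k + 2) // 2
--     lows = list(range(1, num_low + 1))
--     highs = list(range(k + 1, num_low, -1))
--     zig = []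
--     for a, b in zip(lows, highs):
--         zig.append(a)
--         zig.append(b)
--     if len(highs) < len(lows):
--         zig.append(lows[-1])
--     return zig + list(range(k + 2, n + 1))
-- ===== Notes on version B (the rewrite author's own statement) =====
-- stated objective: alternative
-- what changed: B builds the zigzag prefix by constructing an ascending low range and a descending high range and interleaving them pairwise (appending the leftover low when k is even), then concatenates the tail range(k+2, n+1), instead of A's single loop selecting each element by index parity. (same O(n) work; bulk range construction replaces the per-element parity branch, a constant-factor gain measured on large k)
import Mathlib
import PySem

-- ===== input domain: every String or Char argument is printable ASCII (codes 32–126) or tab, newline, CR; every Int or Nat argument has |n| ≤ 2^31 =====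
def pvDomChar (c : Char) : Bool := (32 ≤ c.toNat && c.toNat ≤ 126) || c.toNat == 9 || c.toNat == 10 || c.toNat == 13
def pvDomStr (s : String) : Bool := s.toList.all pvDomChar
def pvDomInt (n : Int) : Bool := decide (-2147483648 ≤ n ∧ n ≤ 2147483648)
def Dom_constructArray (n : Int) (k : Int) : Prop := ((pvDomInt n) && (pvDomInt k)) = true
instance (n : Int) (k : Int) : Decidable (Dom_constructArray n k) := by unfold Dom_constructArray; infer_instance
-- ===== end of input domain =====

-- B builds the zigzag by interleaving an ascending low run with a descending high run
-- (two ranges merged pairwise) instead of A's single index-parity loop; objective: alternative decomposition, same cost.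

-- ===== PORT A =====
-- 'i&1==0' is ported as 'i % 2 = 0': exact, since every i from range(k+1) is nonnegative.
def constructArray (n : Int) (k : Int) : List Int :=
  let result : List Int :=
    (PySem.List.pyRange 0 (k + 1) 1).foldl
      (fun result i =>
        if PySem.Int.mod i 2 = 0 then
          result ++ [PySem.Int.floordiv i 2 + 1]
        else
          result ++ [k + 1 - PySem.Int.floordiv i 2]) []
  (PySem.List.pyRange (k + 1) n 1).foldl (fun result i => result ++ [i + 1]) result

-- ===== PORT B =====
-- lows[-1] is taken only under 'len(highs) < len(lows)', where lows is nonempty; getLast! is exact there.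
def constructArray_alt (n : Int) (k : Int) : List Int :=
  let numLow := PySem.Int.floordiv (k + 2) 2
  let lows := PySem.List.pyRange 1 (numLow + 1) 1
  let highs := PySem.List.pyRange (k + 1) numLow (-1)
  let zig := (lows.zip highs).foldl (fun zig p => zig ++ [p.1, p.2]) []
  let zig2 := if highs.length < lows.length then zig ++ [lows.getLast!] else zig
  zig2 ++ PySem.List.pyRange (k + 2) (n + 1) 1

-- ===== PRECONDITION & SPEC =====
def Spec_constructArray (n : Int) (k : Int) (out : List Int) : Prop := out = constructArray_alt n k
instance (n : Int) (k : Int) (out : List Int) : Decidable (Spec_constructArray n k out) := by unfold Spec_constructArray; infer_instance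

-- ===== CLAIM (what is proved, stated in full; the proofs are below) =====
def Claim_equal_constructArray : Prop := ∀ (n : Int) (k : Int), Dom_constructArray n k → Spec_constructArray n k (constructArray n k)

-- ===== LEMMAS AND PROOFS =====

-- length of the pairwise-interleaved list
theorem pvLenPairs (ps : List (Int × Int)) :
    (ps.flatMap fun p => [p.1, p.2]).length = 2 * ps.length := by
  induction ps with
  | nil => simp
  | cons p ps ih => simp [ih]; omega

-- element of the pairwise-interleaved list
theorem pvGetPairs (ps : List (Int × Int)) (j : Nat) (h : j < 2 * ps.length) :
    (ps.flatMap fun p => [p.1, p.2])[j]'(by rw [pvLenPairs]; exact h) =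
      if j % 2 = 0 then (ps[j / 2]'(by omega)).1 else (ps[j / 2]'(by omega)).2 := by
  induction ps generalizing j with
  | nil => simp at h
  | cons p ps ih =>
    match j with
    | 0 => simp
    | 1 => simp
    | (j + 2) =>
      have h' : j < 2 * ps.length := by simp at h; omega
      have e1 : (j + 2) % 2 = j % 2 := by omega
      have e2 : (j + 2) / 2 = j / 2 + 1 := by omega
      simp only [List.flatMap_cons, List.cons_append, List.nil_append,
        List.getElem_cons_succ, e1, e2]
      exact ih j h'

-- the tail of A equals the tail of B
theorem pvTailEq (n k : Int) :
    (PySem.List.pyRange (k + 1) n 1).map (fun i => i + 1) =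
      PySem.List.pyRange (k + 2) (n + 1) 1 := by
  rw [PySem.List.pyRange_one, PySem.List.pyRange_one, List.map_map]
  have ht : (n - (k + 1)).toNat = (n + 1 - (k + 2)).toNat := by omega
  rw [ht]
  apply List.map_congr_left
  intro a _
  simp
  ring

-- the zigzag prefix of A equals the zigzag prefix of B
theorem pvZigEq (k : Int) :
    (PySem.List.pyRange 0 (k + 1) 1).map
        (fun i => if PySem.Int.mod i 2 = 0 then PySem.Int.floordiv i 2 + 1
                  else k + 1 - PySem.Int.floordiv i 2) =
      (if (PySem.List.pyRange (k + 1) (PySem.Int.floordiv (k + 2) 2) (-1)).length <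
          (PySem.List.pyRange 1 (PySem.Int.floordiv (k + 2) 2 + 1) 1).length then
        ((PySem.List.pyRange 1 (PySem.Int.floordiv (k + 2) 2 + 1) 1).zip
            (PySem.List.pyRange (k + 1) (PySem.Int.floordiv (k + 2) 2) (-1))).flatMap
          (fun p => [p.1, p.2]) ++
          [(PySem.List.pyRange 1 (PySem.Int.floordiv (k + 2) 2 + 1) 1).getLast!]
      else
        ((PySem.List.pyRange 1 (PySem.Int.floordiv (k + 2) 2 + 1) 1).zip
            (PySem.List.pyRange (k + 1) (PySem.Int.floordiv (k + 2) 2) (-1))).flatMap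
          (fun p => [p.1, p.2])) := by
  have hdm := PySem.Int.floordiv_mul_add_mod (k + 2) 2
  have hm0 : 0 ≤ PySem.Int.mod (k + 2) 2 := PySem.Int.mod_nonneg _ (by norm_num)
  have hm2 : PySem.Int.mod (k + 2) 2 < 2 := PySem.Int.mod_lt _ (by norm_num)
  set r := PySem.Int.mod (k + 2) 2 with hr
  set L := PySem.Int.floordiv (k + 2) 2 with hLdef
  rcases (by omega : k + 1 ≤ 0 ∨ 0 < k + 1) with hk | hk
  · have h1 : PySem.List.pyRange 0 (k + 1) 1 = [] :=
      PySem.List.pyRange_one_eq_nil (by omega)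
    have h2 : PySem.List.pyRange 1 (L + 1) 1 = [] :=
      PySem.List.pyRange_one_eq_nil (by omega)
    have h3 : PySem.List.pyRange (k + 1) L (-1) = [] :=
      PySem.List.pyRange_neg_one_eq_nil (by omega)
    simp [h1, h2, h3]
  · have hL1 : 1 ≤ L := by omega
    have hLk : L ≤ k + 1 := by omega
    have hlast : (PySem.List.pyRange 1 (L + 1) 1).getLast! = L := by
      rw [PySem.List.pyRange_one_succ_right (by omega : (1:Int) ≤ L)]
      simp
    rw [hlast]
    simp only [PySem.List.pyRange_one, PySem.List.pyRange_neg_one]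
    have e1 : (L + 1 - 1).toNat = L.toNat := by omega
    have e2 : (k + 1 - 0).toNat = (k + 1).toNat := by omega
    rw [e1, e2]
    have hzl : (((List.range L.toNat).map fun (t : Nat) => 1 + (t : Int)).zip
        ((List.range (k + 1 - L).toNat).map fun (t : Nat) => k + 1 - (t : Int))).length
        = (k + 1 - L).toNat := by
      simp [List.length_zip]; omega
    have hflat : ∀ j : Nat, j < 2 * (k + 1 - L).toNat →
        ∀ (hh : j < ((((List.range L.toNat).map fun (t : Nat) => 1 + (t : Int)).zip
            ((List.range (k + 1 - L).toNat).map fun (t : Nat) => k + 1 - (t : Int))).flatMap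
            (fun p => [p.1, p.2])).length),
        ((((List.range L.toNat).map fun (t : Nat) => 1 + (t : Int)).zip
            ((List.range (k + 1 - L).toNat).map fun (t : Nat) => k + 1 - (t : Int))).flatMap
            (fun p => [p.1, p.2]))[j]'hh =
          if j % 2 = 0 then 1 + ((j / 2 : Nat) : Int) else k + 1 - ((j / 2 : Nat) : Int) := by
      intro j hj hh
      rw [pvGetPairs _ j (by rw [hzl]; exact hj)]
      simp only [List.getElem_zip, List.getElem_map, List.getElem_range]
    have hg : ∀ j : Nat, j < (k + 1).toNat →
        (if PySem.Int.mod (0 + (j : Int)) 2 = 0 then PySem.Int.floordiv (0 + (j : Int)) 2 + 1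
         else k + 1 - PySem.Int.floordiv (0 + (j : Int)) 2) =
        if j % 2 = 0 then ((j / 2 : Nat) : Int) + 1 else k + 1 - ((j / 2 : Nat) : Int) := by
      intro j hj
      have hfd : PySem.Int.floordiv ((j : Int)) 2 = ((j / 2 : Nat) : Int) := by
        exact_mod_cast PySem.Int.floordiv_natCast j 2
      have hmd : PySem.Int.mod ((j : Int)) 2 = ((j % 2 : Nat) : Int) := by
        exact_mod_cast PySem.Int.mod_natCast j 2
      rw [zero_add, hfd, hmd]
      by_cases hp : j % 2 = 0
      · rw [if_pos (by exact_mod_cast congrArg (Nat.cast : Nat → Int) hp), if_pos hp]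
      · rw [if_neg (by intro hc; exact hp (by exact_mod_cast hc)), if_neg hp]
    rcases (by omega : r = 0 ∨ r = 1) with h0 | h1
    · -- k even: highs is one shorter, the last low is appended
      rw [if_pos (by simp; omega)]
      apply List.ext_getElem
      · simp [hzl]; omega
      · intro j hL hR
        rw [List.getElem_map, List.getElem_map, List.getElem_range, hg j (by simpa using hL)]
        by_cases hjs : j < 2 * (k + 1 - L).toNat
        · rw [List.getElem_append_left (by rw [pvLenPairs, hzl]; exact hjs),
            hflat j hjs _]
          split <;> ring
        · have hje : j = 2 * (k + 1 - L).toNat := by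
            simp [hzl] at hR; simp at hL; omega
          rw [List.getElem_append_right (by rw [pvLenPairs, hzl]; omega)]
          simp [hzl, hje]
          omega
    · -- k odd: lows and highs have equal length
      rw [if_neg (by simp; omega)]
      apply List.ext_getElem
      · simp [hzl]; omega
      · intro j hL hR
        rw [List.getElem_map, List.getElem_map, List.getElem_range, hg j (by simpa using hL)]
        have hjs : j < 2 * (k + 1 - L).toNat := by
          rw [pvLenPairs, hzl] at hR; exact hR
        rw [hflat j hjs _]
        split <;> ring

theorem pvMain (n k : Int) : constructArray n k = constructArray_alt n k := by
  have hfun : (fun (result : List Int) (i : Int) =>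
      if PySem.Int.mod i 2 = 0 then result ++ [PySem.Int.floordiv i 2 + 1]
      else result ++ [k + 1 - PySem.Int.floordiv i 2]) =
      (fun (result : List Int) (i : Int) =>
        result ++ [if PySem.Int.mod i 2 = 0 then PySem.Int.floordiv i 2 + 1
                   else k + 1 - PySem.Int.floordiv i 2]) := by
    funext result i; split <;> rfl
  simp only [constructArray, constructArray_alt, hfun,
    PySem.List.foldl_append_singleton_eq_map, PySem.List.foldl_append_eq_flatMap,
    List.nil_append]
  rw [← pvTailEq n k, pvZigEq k]

-- ===== VERDICT (by name: the statement is the Claim_ definition above) =====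
theorem constructArray_spec : Claim_equal_constructArray := by
  intro n k _
  exact pvMain n k
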